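-- pv_equiv track=rewrite | github.com/relixia/Optical-Character-Recognition-Analysis | ocr_analysis/utilities/helper_validator.py | detect_card_type
-- ===== SOURCE A (Python) =====
-- def detect_card_type(card_number):
--     card_type_mapping = {
--         "37": "Amex",
--         "4": "Visa",
--         "51": "MasterCard",
--         "52": "MasterCard",
--         "53": "MasterCard",
--         "54": "MasterCard",
--         "55": "MasterCard",
--         "300": "Diners Club",
--         "301": "Diners Club",
--         "302": "Diners Club",
--         "303": "Diners Club",
--         "304": "Diners Club",
--         "305": "Diners Club",
--         "36": "Diners Club",
--         "38": "Diners Club",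
--         "6011": "Discover",
--         "65": "Discover",
--         "35": "JCB"
--     }
--
--     return next((card_type for prefix, card_type in card_type_mapping.items() if card_number.startswith(prefix)), "Unknown")
-- ===== SOURCE B (Python) =====
-- def detect_card_type(card_number):
--     # prefixes bucketed by length; no prefix is a prefix of another, so
--     # longest-first slice+lookup finds the same unique match as a linear scan
--     prefixes_by_length = {
--         4: {"6011": "Discover"},
--         3: {"300": "Diners Club", "301": "Diners Club", "302": "Diners Club",
--             "303": "Diners Club", "304": "Diners Club", "305": "Diners Club"},
--         2: {"37": "Amex", "51": "MasterCard", "52": "MasterCard",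
--             "53": "MasterCard", "54": "MasterCard", "55": "MasterCard",
--             "36": "Diners Club", "38": "Diners Club", "65": "Discover",
--             "35": "JCB"},
--         1: {"4": "Visa"},
--     }
--     for length, table in prefixes_by_length.items():
--         card_type = table.get(card_number[:length])
--         if card_type is not None:
--             return card_type
--     return "Unknown"
-- ===== Notes on version B (the rewrite author's own statement) =====
-- stated objective: idiomatic
-- what changed: A scans all 18 (prefix, type) pairs with startswith; B buckets the prefixes by length in a dict of dicts and, longest length first, slices the card number and does a single hash lookup per length.
import Mathlib
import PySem

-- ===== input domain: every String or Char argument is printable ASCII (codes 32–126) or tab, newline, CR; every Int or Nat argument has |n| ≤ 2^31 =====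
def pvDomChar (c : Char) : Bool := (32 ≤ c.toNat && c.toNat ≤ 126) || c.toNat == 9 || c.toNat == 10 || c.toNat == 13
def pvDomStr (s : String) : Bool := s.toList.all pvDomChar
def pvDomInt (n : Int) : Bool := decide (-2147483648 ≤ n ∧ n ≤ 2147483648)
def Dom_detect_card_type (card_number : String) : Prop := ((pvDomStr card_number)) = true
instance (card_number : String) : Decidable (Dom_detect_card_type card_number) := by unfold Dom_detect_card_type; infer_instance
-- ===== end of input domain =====

-- B replaces A's linear startswith scan over all 18 prefixes by bucketing the prefixes
-- by length and doing a longest-first slice + dict lookup (idiomatic restructuring).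

-- ===== PORT A =====
def pvCardTypeMapping : List (String × String) :=
  [("37", "Amex"), ("4", "Visa"),
   ("51", "MasterCard"), ("52", "MasterCard"), ("53", "MasterCard"),
   ("54", "MasterCard"), ("55", "MasterCard"),
   ("300", "Diners Club"), ("301", "Diners Club"), ("302", "Diners Club"),
   ("303", "Diners Club"), ("304", "Diners Club"), ("305", "Diners Club"),
   ("36", "Diners Club"), ("38", "Diners Club"),
   ("6011", "Discover"), ("65", "Discover"), ("35", "JCB")]

-- the generator scan of next(...): first item whose prefix matches, default "Unknown"
def pvFirstMatch (card_number : String) : List (String × String) → String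
  | [] => "Unknown"
  | (prefix_, card_type) :: rest =>
    if PySem.Str.startswith card_number prefix_ then card_type
    else pvFirstMatch card_number rest

def detect_card_type (card_number : String) : String :=
  pvFirstMatch card_number pvCardTypeMapping

-- ===== PORT B =====
def pvPrefixesByLength : List (Int × PySem.Dict String String) :=
  [(4, PySem.Dict.ofList [("6011", "Discover")]),
   (3, PySem.Dict.ofList [("300", "Diners Club"), ("301", "Diners Club"),
        ("302", "Diners Club"), ("303", "Diners Club"), ("304", "Diners Club"),
        ("305", "Diners Club")]),
   (2, PySem.Dict.ofList [("37", "Amex"), ("51", "MasterCard"), ("52", "MasterCard"),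
        ("53", "MasterCard"), ("54", "MasterCard"), ("55", "MasterCard"),
        ("36", "Diners Club"), ("38", "Diners Club"), ("65", "Discover"),
        ("35", "JCB")]),
   (1, PySem.Dict.ofList [("4", "Visa")])]

-- the 'for length, table in prefixes_by_length.items()' loop of Source B
def pvAltLoop (card_number : String) : List (Int × PySem.Dict String String) → String
  | [] => "Unknown"
  | (length, table) :: rest =>
    match table.get? (PySem.Str.slice card_number none (some length)) with
    | some t => t
    | none => pvAltLoop card_number rest

def detect_card_type_alt (card_number : String) : String :=
  pvAltLoop card_number pvPrefixesByLength

-- ===== PRECONDITION & SPEC =====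
def Spec_detect_card_type (card_number : String) (out : String) : Prop := out = detect_card_type_alt card_number
instance (card_number : String) (out : String) : Decidable (Spec_detect_card_type card_number out) := by unfold Spec_detect_card_type; infer_instance

-- ===== CLAIM (what is proved, stated in full; the proofs are below) =====
def Claim_equal_detect_card_type : Prop := ∀ (card_number : String), Dom_detect_card_type card_number → Spec_detect_card_type card_number (detect_card_type card_number)

-- ===== LEMMAS AND PROOFS =====
-- Both programs only inspect the first four characters of the input: case on them and
-- exhaust the finitely many prefix comparisons.
set_option maxHeartbeats 4000000 in
set_option maxRecDepth 8192 in
lemma pv_main (s : String) : detect_card_type s = detect_card_type_alt s := by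
  have e : pvPrefixesByLength =
    [(4, PySem.Dict.mk [("6011", "Discover")]),
     (3, PySem.Dict.mk [("300", "Diners Club"), ("301", "Diners Club"),
          ("302", "Diners Club"), ("303", "Diners Club"), ("304", "Diners Club"),
          ("305", "Diners Club")]),
     (2, PySem.Dict.mk [("37", "Amex"), ("51", "MasterCard"), ("52", "MasterCard"),
          ("53", "MasterCard"), ("54", "MasterCard"), ("55", "MasterCard"),
          ("36", "Diners Club"), ("38", "Diners Club"), ("65", "Discover"),
          ("35", "JCB")]),
     (1, PySem.Dict.mk [("4", "Visa")])] := rfl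
  simp only [detect_card_type, detect_card_type_alt, pvCardTypeMapping, e, pvAltLoop, pvFirstMatch]
  rcases hl : s.toList with _ | ⟨c1, _ | ⟨c2, _ | ⟨c3, _ | ⟨c4, rest⟩⟩⟩⟩ <;>
    simp only [PySem.Dict.get?_mk_cons] <;>
    simp [PySem.Str.startswith, PySem.Str.slice, PySem.Chars.startswith, hl,
      PySem.Dict.get?,
      PySem.List.slice, PySem.List.clampIdx, List.isPrefixOf, List.take,
      String.ext_iff, String.toList_ofList] <;>
    (try (split_ifs <;> (try simp_all) <;> (try (subst_vars; simp_all)))) <;>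
    (try (by_cases h3 : '3' = c1 <;> by_cases h4 : '4' = c1 <;> by_cases h5 : '5' = c1 <;>
          by_cases h6 : '6' = c1 <;> (try subst_vars) <;> (try simp_all) <;>
          (try (split_ifs <;> (try simp_all) <;> (try (subst_vars; simp_all))))))

-- ===== VERDICT (by name: the statement is the Claim_ definition above) =====
theorem detect_card_type_spec : Claim_equal_detect_card_type := by
  intro s _
  unfold Spec_detect_card_type
  exact pv_main s
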